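-- pv_equiv track=rewrite | github.com/daniel-reich/ubiquitous-fiesta | 76ibd8jZxvhAwDskb_20.py | tallest_skyscraper
-- ===== SOURCE A (Python) =====
-- def tallest_skyscraper(lst):
--   towers = {}
--   for i in lst:
--     for ind,k in enumerate(i):
--       towers[ind] = 0
--   for i in lst:
--     for ind,k in enumerate(i):
--       if k == 1:
--         towers[ind] += 1
--       else:
--         towers[ind] += 0
--   return max(i for i in towers.values())
-- ===== SOURCE B (Python) =====
-- def tallest_skyscraper(lst):
--     width = max(len(row) for row in lst)
--     return max(sum(1 for row in lst if ind < len(row) and row[ind] == 1)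
--                for ind in range(width))
-- ===== Notes on version B (the rewrite author's own statement) =====
-- stated objective: simpler
-- what changed: B computes each column's count of 1s directly (max over column indices of a per-column scan) instead of A's two full passes that build and then increment a per-index dict.
import Mathlib
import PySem

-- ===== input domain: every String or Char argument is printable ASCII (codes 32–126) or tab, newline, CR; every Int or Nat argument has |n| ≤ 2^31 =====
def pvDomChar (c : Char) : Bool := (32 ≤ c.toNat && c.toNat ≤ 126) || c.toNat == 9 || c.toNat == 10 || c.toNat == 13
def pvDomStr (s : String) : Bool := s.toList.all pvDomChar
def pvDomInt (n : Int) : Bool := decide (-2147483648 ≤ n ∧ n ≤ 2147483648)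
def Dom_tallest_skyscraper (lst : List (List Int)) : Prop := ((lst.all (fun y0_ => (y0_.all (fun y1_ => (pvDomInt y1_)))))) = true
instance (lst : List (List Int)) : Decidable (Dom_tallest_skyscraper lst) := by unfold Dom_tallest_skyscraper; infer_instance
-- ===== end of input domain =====

-- B computes each column count directly (max over column indices of that column's count
-- of 1s) instead of A's two dict-building passes over all rows; objective: simpler.

-- ===== PORT A =====
-- 'towers[ind] += 1' always finds its key (the first loop inserted it), so modify's
-- default 0 is never consulted; Python's max() raises ValueError when towers is empty
-- (lst empty or all rows empty) — Pre_ excludes that, so '.getD 0' is never reached under Pre_.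
def tallest_skyscraper (lst : List (List Int)) : Int :=
  let towers : PySem.Dict Int Int := PySem.Dict.empty
  let towers := lst.foldl (fun t i =>
    (PySem.List.enumerate i).foldl (fun t p => t.insert p.1 0) t) towers
  let towers := lst.foldl (fun t i =>
    (PySem.List.enumerate i).foldl (fun t p =>
      if p.2 == 1 then t.modify p.1 0 (· + 1) else t.modify p.1 0 (· + 0)) t) towers
  (PySem.List.max? towers.values id).getD 0

-- ===== PORT B =====
-- Python's max(...) raises on an empty argument (lst empty / all rows empty) — outside
-- Pre_; '.getD 0' stands at those unreached spots.
def tallest_skyscraper_alt (lst : List (List Int)) : Int :=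
  let width : Int := (PySem.List.max? (lst.map (fun row => (row.length : Int))) id).getD 0
  (PySem.List.max? ((PySem.List.pyRange 0 width).map (fun ind =>
      lst.foldl (fun acc row =>
        acc + (if ind < (row.length : Int) ∧ PySem.List.pyGetD row ind 0 = 1 then 1 else 0)) 0)) id).getD 0

-- ===== PRECONDITION & SPEC =====
-- Pre_ excludes exactly the inputs where Python A raises ValueError (max() of an empty
-- dict-values view: lst empty or every row empty); Python B raises there too.
def Pre_tallest_skyscraper (lst : List (List Int)) : Prop := ∃ row ∈ lst, row ≠ []
instance (lst : List (List Int)) : Decidable (Pre_tallest_skyscraper lst) := by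
  unfold Pre_tallest_skyscraper; infer_instance
def pvWitness_tallest_skyscraper : List (List Int) := [[1, 0], [0, 1, 1]]
def Spec_tallest_skyscraper (lst : List (List Int)) (out : Int) : Prop := out = tallest_skyscraper_alt lst
instance (lst : List (List Int)) (out : Int) : Decidable (Spec_tallest_skyscraper lst out) := by unfold Spec_tallest_skyscraper; infer_instance

-- ===== CLAIM (what is proved, stated in full; the proofs are below) =====
def Claim_equal_tallest_skyscraper : Prop := ∀ (lst : List (List Int)), Dom_tallest_skyscraper lst → Pre_tallest_skyscraper lst → Spec_tallest_skyscraper lst (tallest_skyscraper lst)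

-- ===== LEMMAS AND PROOFS =====

-- max row length (as Int), the common width of both programs
def pvW (lst : List (List Int)) : Int :=
  (lst.map (fun r => (r.length : Int))).foldl max 0

-- contribution of one row to column ind, scanning from position s
def pvRowCnt : List Int → Int → Int → Int
  | [], _, _ => 0
  | x :: xs, s, ind => (if s = ind ∧ x = 1 then 1 else 0) + pvRowCnt xs (s + 1) ind

-- total count of 1s in column ind
def pvColCnt : List (List Int) → Int → Int
  | [], _ => 0
  | r :: t, ind => pvRowCnt r 0 ind + pvColCnt t ind

lemma pv_keys1row (row : List Int) : ∀ (s m : Int) (d : PySem.Dict Int Int),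
    0 ≤ s → s ≤ m → d.keys = PySem.List.pyRange 0 m →
    ((PySem.List.enumerate row s).foldl (fun t p => t.insert p.1 0) d).keys
      = PySem.List.pyRange 0 (max m (s + row.length)) := by
  induction row with
  | nil =>
    intro s m d hs hsm hk
    simp [PySem.List.enumerate, hk]
    congr 1
    omega
  | cons x xs ih =>
    intro s m d hs hsm hk
    rw [PySem.List.enumerate_cons]
    simp only [List.foldl_cons]
    rcases lt_or_eq_of_le hsm with hlt | heq
    · have hc : d.contains s = true := by
        rw [PySem.Dict.contains_eq_decide_mem_keys, hk]
        simp [PySem.List.mem_pyRange_one]; omega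
      have hkeys : (d.insert s 0).keys = PySem.List.pyRange 0 m :=
        by rw [PySem.Dict.keys_insert_of_contains d 0 hc, hk]
      rw [ih (s+1) m _ (by omega) (by omega) hkeys]
      congr 1
      simp only [List.length_cons]
      push_cast
      omega
    · subst heq
      have hc : d.contains s = false := by
        rw [PySem.Dict.contains_eq_decide_mem_keys, hk]
        simp [PySem.List.mem_pyRange_one]
      have hkeys : (d.insert s 0).keys = PySem.List.pyRange 0 (s + 1) := by
        rw [PySem.Dict.keys_insert_of_not_contains d 0 hc, hk,
          PySem.List.pyRange_one_succ_right hs]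
      rw [ih (s+1) (s+1) _ (by omega) (by omega) hkeys]
      congr 1
      simp only [List.length_cons]
      push_cast
      omega

lemma pv_keys1 (lst : List (List Int)) : ∀ (m : Int) (d : PySem.Dict Int Int),
    0 ≤ m → d.keys = PySem.List.pyRange 0 m →
    (lst.foldl (fun t i => (PySem.List.enumerate i).foldl (fun t p => t.insert p.1 0) t) d).keys
      = PySem.List.pyRange 0 ((lst.map (fun r => (r.length : Int))).foldl max m) := by
  induction lst with
  | nil => intro m d hm hk; simpa using hk
  | cons r t ih =>
    intro m d hm hk
    simp only [List.foldl_cons, List.map_cons]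
    have h1 := pv_keys1row r 0 m d le_rfl hm hk
    rw [zero_add] at h1
    exact ih (max m r.length) _ (by positivity) h1

lemma pv_getD1 (lst : List (List Int)) : ∀ (d : PySem.Dict Int Int),
    (∀ j, d.getD j 0 = 0) → ∀ j,
    (lst.foldl (fun t i => (PySem.List.enumerate i).foldl (fun t p => t.insert p.1 0) t) d).getD j 0 = 0 := by
  have row : ∀ (r : List Int) (s : Int) (d : PySem.Dict Int Int), (∀ j, d.getD j 0 = 0) → ∀ j,
      ((PySem.List.enumerate r s).foldl (fun t p => t.insert p.1 0) d).getD j 0 = 0 := by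
    intro r
    induction r with
    | nil => intro s d h j; simpa [PySem.List.enumerate] using h j
    | cons x xs ih =>
      intro s d h j
      rw [PySem.List.enumerate_cons]
      simp only [List.foldl_cons]
      refine ih (s+1) _ (fun j' => ?_) j
      rw [PySem.Dict.getD_insert]
      split <;> simp [h]
  induction lst with
  | nil => intro d h j; exact h j
  | cons r t ih =>
    intro d h j
    simp only [List.foldl_cons]
    exact ih _ (row r 0 d h) j

lemma pv_keys2row (row : List Int) : ∀ (s m : Int) (d : PySem.Dict Int Int),
    0 ≤ s → s + row.length ≤ m → d.keys = PySem.List.pyRange 0 m →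
    ((PySem.List.enumerate row s).foldl (fun t p =>
        if p.2 == 1 then t.modify p.1 0 (· + 1) else t.modify p.1 0 (· + 0)) d).keys
      = PySem.List.pyRange 0 m := by
  induction row with
  | nil => intro s m d _ _ hk; simpa [PySem.List.enumerate] using hk
  | cons x xs ih =>
    intro s m d hs hlen hk
    rw [PySem.List.enumerate_cons]
    simp only [List.foldl_cons, List.length_cons] at *
    have hc : d.contains s = true := by
      rw [PySem.Dict.contains_eq_decide_mem_keys, hk]
      simp only [PySem.List.mem_pyRange_one, decide_eq_true_eq]
      refine ⟨hs, ?_⟩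
      push_cast at hlen
      omega
    have key : ∀ (f : Int → Int), (d.modify s 0 f).keys = PySem.List.pyRange 0 m := by
      intro f
      rw [PySem.Dict.keys_modify, PySem.Dict.keys_insert_of_contains d _ hc, hk]
    split
    · exact ih (s+1) m _ (by omega) (by push_cast at hlen ⊢; omega) (key _)
    · exact ih (s+1) m _ (by omega) (by push_cast at hlen ⊢; omega) (key _)

lemma pv_keys2 (lst : List (List Int)) (m : Int) : ∀ (d : PySem.Dict Int Int),
    (∀ r ∈ lst, (r.length : Int) ≤ m) → d.keys = PySem.List.pyRange 0 m →
    (lst.foldl (fun t i => (PySem.List.enumerate i).foldl (fun t p =>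
        if p.2 == 1 then t.modify p.1 0 (· + 1) else t.modify p.1 0 (· + 0)) t) d).keys
      = PySem.List.pyRange 0 m := by
  induction lst with
  | nil => intro d _ hk; simpa using hk
  | cons r t ih =>
    intro d hall hk
    simp only [List.foldl_cons]
    refine ih _ (fun r' hr' => hall r' (List.mem_cons_of_mem _ hr')) ?_
    exact pv_keys2row r 0 m d le_rfl (by simpa using hall r List.mem_cons_self) hk

lemma pv_getD2row (row : List Int) (ind : Int) : ∀ (s : Int) (d : PySem.Dict Int Int),
    ((PySem.List.enumerate row s).foldl (fun t p =>
        if p.2 == 1 then t.modify p.1 0 (· + 1) else t.modify p.1 0 (· + 0)) d).getD ind 0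
      = d.getD ind 0 + pvRowCnt row s ind := by
  induction row with
  | nil => intro s d; simp [PySem.List.enumerate, pvRowCnt]
  | cons x xs ih =>
    intro s d
    rw [PySem.List.enumerate_cons]
    simp only [List.foldl_cons, pvRowCnt]
    split
    · rename_i hx
      rw [ih (s+1)]
      rw [PySem.Dict.getD_modify]
      simp only [beq_iff_eq] at hx
      by_cases hi : ind = s
      · simp [hi, hx]; ring
      · rw [if_neg hi, if_neg (fun h => hi h.1.symm)]
        ring
    · rename_i hx
      rw [ih (s+1)]
      rw [PySem.Dict.getD_modify]
      simp only [beq_iff_eq] at hx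
      by_cases hi : ind = s
      · simp [hi, hx]
      · rw [if_neg hi, if_neg (fun h => hi h.1.symm)]
        ring

lemma pv_getD2 (lst : List (List Int)) (ind : Int) : ∀ (d : PySem.Dict Int Int),
    (lst.foldl (fun t i => (PySem.List.enumerate i).foldl (fun t p =>
        if p.2 == 1 then t.modify p.1 0 (· + 1) else t.modify p.1 0 (· + 0)) t) d).getD ind 0
      = d.getD ind 0 + pvColCnt lst ind := by
  induction lst with
  | nil => intro d; simp [pvColCnt]
  | cons r t ih =>
    intro d
    simp only [List.foldl_cons, pvColCnt, ih, pv_getD2row]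
    ring

lemma pv_rowCnt_char (row : List Int) (ind : Int) : ∀ (s : Int), 0 ≤ s →
    pvRowCnt row s ind
      = if s ≤ ind ∧ ind < s + row.length ∧ PySem.List.pyGetD row (ind - s) 0 = 1 then 1 else 0 := by
  induction row with
  | nil =>
    intro s hs
    simp only [pvRowCnt]
    rw [eq_comm, if_neg]
    rintro ⟨h1, h2, -⟩
    simp at h2
    omega
  | cons x xs ih =>
    intro s hs
    simp only [pvRowCnt, List.length_cons, ih (s+1) (by omega)]
    by_cases hi : s = ind
    · subst hi
      have hg : PySem.List.pyGetD (x :: xs) (s - s) 0 = x := by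
        simp [PySem.List.pyGetD, PySem.List.pyIdx?, PySem.List.pyGet?]
      rw [show (if s + 1 ≤ s ∧ s < s + 1 + (xs.length : Int) ∧ PySem.List.pyGetD xs (s - (s + 1)) 0 = 1
            then (1:Int) else 0) = 0 from if_neg (fun h => absurd h.1 (by omega))]
      by_cases hx : x = 1
      · rw [if_pos ⟨rfl, hx⟩,
          if_pos ⟨le_rfl, by push_cast; omega, by rw [hg]; exact hx⟩]
        simp
      · rw [if_neg (fun h => hx h.2), if_neg (fun h => hx (hg ▸ h.2.2))]
        simp
    · rw [if_neg (fun h => hi h.1)]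
      by_cases hr : s + 1 ≤ ind ∧ ind < s + 1 + (xs.length : Int)
      · have hg : PySem.List.pyGetD (x :: xs) (ind - s) 0 = PySem.List.pyGetD xs (ind - (s+1)) 0 := by
          rw [PySem.List.pyGetD_eq_getElem _ _ (by omega) (by simp; omega),
              PySem.List.pyGetD_eq_getElem _ _ (by omega) (by have := hr.2; omega)]
          have : (ind - s).toNat = (ind - (s+1)).toNat + 1 := by omega
          simp only [this, List.getElem_cons_succ]
        by_cases hx : PySem.List.pyGetD xs (ind - (s+1)) 0 = 1
        · rw [if_pos ⟨hr.1, hr.2, hx⟩, if_pos ⟨by omega, by push_cast; omega, by rw [hg]; exact hx⟩]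
          simp
        · rw [if_neg (by tauto), if_neg (by rw [hg]; rintro ⟨-, -, h⟩; exact hx h)]
          simp
      · rw [if_neg (by omega), if_neg (by push_cast; omega)]
        simp

lemma pv_colCnt_foldl (lst : List (List Int)) (ind : Int) (h : 0 ≤ ind) : ∀ (acc : Int),
    lst.foldl (fun acc row =>
        acc + (if ind < (row.length : Int) ∧ PySem.List.pyGetD row ind 0 = 1 then 1 else 0)) acc
      = acc + pvColCnt lst ind := by
  induction lst with
  | nil => intro acc; simp [pvColCnt]
  | cons r t ih =>
    intro acc
    simp only [List.foldl_cons, pvColCnt, ih]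
    have hchar := pv_rowCnt_char r ind 0 le_rfl
    rw [zero_add, sub_zero] at hchar
    rw [hchar]
    have : (if 0 ≤ ind ∧ ind < (r.length : Int) ∧ PySem.List.pyGetD r ind 0 = 1 then (1:Int) else 0)
        = (if ind < (r.length : Int) ∧ PySem.List.pyGetD r ind 0 = 1 then (1:Int) else 0) := by
      by_cases hc : ind < (r.length : Int) ∧ PySem.List.pyGetD r ind 0 = 1
      · rw [if_pos ⟨h, hc.1, hc.2⟩, if_pos hc]
      · rw [if_neg (fun hh => hc ⟨hh.2.1, hh.2.2⟩), if_neg hc]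
    rw [this]
    ring

lemma pv_foldl_max_le (xs : List Int) : ∀ (a v : Int), a ≤ v → (∀ y ∈ xs, y ≤ v) → xs.foldl max a ≤ v := by
  induction xs with
  | nil => intro a v hav _; simpa using hav
  | cons x t ih =>
    intro a v hav hall
    simp only [List.foldl_cons]
    exact ih _ v (max_le hav (hall x List.mem_cons_self)) (fun y hy => hall y (List.mem_cons_of_mem _ hy))

lemma pv_width_eq (lst : List (List Int)) (h : lst ≠ []) :
    (PySem.List.max? (lst.map (fun row => (row.length : Int))) id).getD 0 = pvW lst := by
  obtain ⟨m, hm⟩ : ∃ m, PySem.List.max? (lst.map (fun row => (row.length : Int))) id = some m := by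
    rcases Option.eq_none_or_eq_some (PySem.List.max? (lst.map (fun row => (row.length : Int))) id) with h0 | hs
    · rw [PySem.List.max?_eq_none_iff] at h0
      exact absurd (List.map_eq_nil_iff.mp h0) h
    · exact hs
  rw [hm]
  have hmem := PySem.List.max?_mem hm
  have hmax := PySem.List.max?_isMax hm
  have h0m : (0:Int) ≤ m := by
    obtain ⟨r, _, hr⟩ := List.mem_map.mp hmem
    simp [← hr]
  refine le_antisymm ?_ ?_
  · simpa using (PySem.List.le_foldl_max (lst.map (fun r => (r.length : Int))) 0).2 m hmem
  · exact pv_foldl_max_le _ 0 m h0m (fun y hy => by simpa using hmax y hy)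

-- ===== VERDICT (by name: the statement is the Claim_ definition above) =====
theorem tallest_skyscraper_spec : Claim_equal_tallest_skyscraper := by
  intro lst _ hpre
  unfold Spec_tallest_skyscraper tallest_skyscraper tallest_skyscraper_alt
  dsimp only
  have hne : lst ≠ [] := by
    rintro rfl
    obtain ⟨r, hr, -⟩ := hpre
    exact absurd hr (List.not_mem_nil)
  have hk1 : (lst.foldl (fun t i => (PySem.List.enumerate i).foldl (fun t p => t.insert p.1 0) t)
      (PySem.Dict.empty : PySem.Dict Int Int)).keys = PySem.List.pyRange 0 (pvW lst) := by
    have h0 : (PySem.Dict.empty : PySem.Dict Int Int).keys = PySem.List.pyRange 0 0 := by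
      simp [PySem.Dict.keys_empty, PySem.List.pyRange_one_eq_nil le_rfl]
    exact pv_keys1 lst 0 _ le_rfl h0
  have hg1 : ∀ j, (lst.foldl (fun t i => (PySem.List.enumerate i).foldl (fun t p => t.insert p.1 0) t)
      (PySem.Dict.empty : PySem.Dict Int Int)).getD j 0 = 0 :=
    pv_getD1 lst _ (fun j => by simp [PySem.Dict.getD_empty])
  have hbound : ∀ r ∈ lst, (r.length : Int) ≤ pvW lst := fun r hr =>
    (PySem.List.le_foldl_max (lst.map (fun r => (r.length : Int))) 0).2 _
      (List.mem_map_of_mem hr)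
  have hk2 := pv_keys2 lst (pvW lst) _ hbound hk1
  have hvals : (lst.foldl (fun t i => (PySem.List.enumerate i).foldl (fun t p =>
        if p.2 == 1 then t.modify p.1 0 (· + 1) else t.modify p.1 0 (· + 0)) t)
      (lst.foldl (fun t i => (PySem.List.enumerate i).foldl (fun t p => t.insert p.1 0) t)
        (PySem.Dict.empty : PySem.Dict Int Int))).values
      = (PySem.List.pyRange 0 (pvW lst)).map (fun ind => pvColCnt lst ind) := by
    rw [PySem.Dict.values_eq_map_keys _ (hk2 ▸ PySem.List.nodup_pyRange_one 0 (pvW lst)) 0, hk2]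
    refine List.map_congr_left (fun k hk => ?_)
    rw [pv_getD2, hg1, zero_add]
  rw [hvals, pv_width_eq lst hne]
  congr 1
  refine congrArg (fun L => PySem.List.max? L id) ?_
  refine List.map_congr_left (fun ind hind => ?_)
  have h0 : (0:Int) ≤ ind := (PySem.List.mem_pyRange_one.mp hind).1
  rw [pv_colCnt_foldl lst ind h0 0, zero_add]
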